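-- pv_equiv track=rewrite | github.com/estelledoriot/NSI_1ere_Buffon_2020_2021 | 17_td_chaines.py | code_transp
-- ===== SOURCE A (Python) =====
-- def code_transp(message, l):
--     r = ""
--     for i in range(l):
--         k = i
--         while k < len(message):
--             r = r + message[k]
--             k = k + l
--     return r
-- ===== SOURCE B (Python) =====
-- def code_transp(message, l):
--     if l <= 0:
--         return ""
--     rows = []
--     rest = message
--     while rest:
--         rows.append(rest[:l])
--         rest = rest[l:]
--     out = []
--     for col in range(l):
--         for row in rows:
--             if col < len(row):
--                 out.append(row[col])
--     return "".join(out)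
-- ===== Notes on version B (the rewrite author's own statement) =====
-- stated objective: alternative
-- what changed: B materialises the message as a list of row-chunks of length l (with an explicit l<=0 early return) and reads the grid column by column with a col<len(row) test, instead of A's stride-by-l index arithmetic over the flat string.
import Mathlib
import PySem

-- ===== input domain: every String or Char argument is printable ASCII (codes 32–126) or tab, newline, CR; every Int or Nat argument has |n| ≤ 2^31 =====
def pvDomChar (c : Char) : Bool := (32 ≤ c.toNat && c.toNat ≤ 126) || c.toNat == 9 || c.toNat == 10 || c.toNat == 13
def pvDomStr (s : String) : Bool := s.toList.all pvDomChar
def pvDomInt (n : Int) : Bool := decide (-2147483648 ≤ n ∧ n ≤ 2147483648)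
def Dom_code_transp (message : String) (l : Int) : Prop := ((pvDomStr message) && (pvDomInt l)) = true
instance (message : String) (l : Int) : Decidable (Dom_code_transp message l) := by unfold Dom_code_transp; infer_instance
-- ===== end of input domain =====

-- B replaces A's stride-by-l index arithmetic with an explicit row-chunked grid read column by column (alternative decomposition, same cost).

-- ===== PORT A =====
-- inner 'while k < len(message): r = r + message[k]; k = k + l'
-- (the '0 < l' conjunct is a totality guard only: every call site has 0 ≤ k ∧ 0 < l,
--  and Python's loop condition is just k < len(message))
def aInner (cs : List Char) (l : Int) (k : Int) (r : List Char) : List Char :=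
  if h : 0 < l ∧ k < (cs.length : Int) then
    aInner cs l (k + l) (r ++ [PySem.List.pyGetD cs k ' '])
  else r
termination_by ((cs.length : Int) - k).toNat
decreasing_by omega

def code_transp (message : String) (l : Int) : String :=
  String.mk ((PySem.List.pyRange 0 l 1).foldl (fun r i => aInner message.toList l i r) [])

-- ===== PORT B =====
-- 'while rest: rows.append(rest[:l]); rest = rest[l:]'
-- (the '0 < l' conjunct is a totality guard: B only chunks after the 'l <= 0' early return)
def bChunks (cs : List Char) (l : Int) : List (List Char) :=
  if h : 0 < l ∧ cs ≠ [] then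
    PySem.List.slice cs none (some l) :: bChunks (PySem.List.slice cs (some l) none) l
  else []
termination_by cs.length
decreasing_by
  rw [PySem.List.slice_from cs (a := l) (by omega)]
  simp only [List.length_drop]
  have : cs.length ≠ 0 := fun h0 => h.2 (List.eq_nil_of_length_eq_zero h0)
  omega

def code_transp_alt (message : String) (l : Int) : String :=
  if l ≤ 0 then ""
  else
    let rows := bChunks message.toList l
    String.mk ((PySem.List.pyRange 0 l 1).foldl (fun out col =>
      rows.foldl (fun out row =>
        if col < (row.length : Int) then out ++ [PySem.List.pyGetD row col ' '] else out) out) [])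

-- ===== PRECONDITION & SPEC =====
def Spec_code_transp (message : String) (l : Int) (out : String) : Prop := out = code_transp_alt message l
instance (message : String) (l : Int) (out : String) : Decidable (Spec_code_transp message l out) := by unfold Spec_code_transp; infer_instance

-- ===== CLAIM (what is proved, stated in full; the proofs are below) =====
def Claim_equal_code_transp : Prop := ∀ (message : String) (l : Int), Dom_code_transp message l → Spec_code_transp message l (code_transp message l)

-- ===== LEMMAS AND PROOFS =====

-- pure (accumulator-free) version of A's inner while loop
def colA (cs : List Char) (l : Int) (k : Int) : List Char :=
  if h : 0 < l ∧ k < (cs.length : Int) then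
    PySem.List.pyGetD cs k ' ' :: colA cs l (k + l)
  else []
termination_by ((cs.length : Int) - k).toNat
decreasing_by omega

-- the chars a row contributes to column `col`
def colSel (col : Int) (row : List Char) : List Char :=
  if col < (row.length : Int) then [PySem.List.pyGetD row col ' '] else []

theorem aInner_eq (cs : List Char) (l k : Int) (r : List Char) :
    aInner cs l k r = r ++ colA cs l k := by
  induction k, r using aInner.induct cs l with
  | case1 k r h ih =>
    rw [aInner.eq_def cs l k r, colA.eq_def cs l k]
    rw [dif_pos h, dif_pos h, ih]
    simp
  | case2 k r h =>
    rw [aInner.eq_def cs l k r, colA.eq_def cs l k]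
    rw [dif_neg h, dif_neg h]
    simp

theorem colA_shift (cs : List Char) (l : Int) (hl : 0 < l) :
    ∀ (m : Nat) (k : Int), 0 ≤ k → ((cs.length : Int) - k).toNat ≤ m →
      colA cs l (k + l) = colA (cs.drop l.toNat) l k := by
  intro m
  induction m with
  | zero =>
    intro k hk hm
    rw [colA.eq_def cs l (k + l), colA.eq_def (cs.drop l.toNat) l k]
    rw [dif_neg (by rintro ⟨-, hc⟩; omega),
        dif_neg (by rintro ⟨-, hc⟩; simp only [List.length_drop] at hc; omega)]
  | succ m ih =>
    intro k hk hm
    rw [colA.eq_def cs l (k + l), colA.eq_def (cs.drop l.toNat) l k]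
    by_cases h : k + l < (cs.length : Int)
    · rw [dif_pos ⟨hl, h⟩, dif_pos ⟨hl, by simp only [List.length_drop]; omega⟩]
      congr 1
      · rw [PySem.List.pyGetD_eq_getElem cs ' ' (by omega) h,
            PySem.List.pyGetD_eq_getElem (cs.drop l.toNat) ' ' hk
              (by simp only [List.length_drop]; omega)]
        rw [List.getElem_drop]
        congr 1
        omega
      · exact ih (k + l) (by omega) (by omega)
    · rw [dif_neg (by rintro ⟨-, hc⟩; omega),
          dif_neg (by rintro ⟨-, hc⟩; simp only [List.length_drop] at hc; omega)]

theorem colA_eq_flat (l : Int) (hl : 0 < l) :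
    ∀ (n : Nat) (cs : List Char), cs.length = n → ∀ (col : Int), 0 ≤ col → col < l →
      colA cs l col = (bChunks cs l).flatMap (colSel col) := by
  intro n
  induction n using Nat.strong_induction_on with
  | _ n ih =>
    intro cs hn col h0 hcol
    by_cases hcs : cs = []
    · subst hcs
      rw [colA.eq_def ([] : List Char) l col, bChunks.eq_def ([] : List Char) l]
      rw [dif_neg (by rintro ⟨-, hc⟩; simp at hc; omega),
          dif_neg (by rintro ⟨-, hc⟩; exact hc rfl)]
      simp
    · have hne : cs.length ≠ 0 := fun h0' => hcs (List.eq_nil_of_length_eq_zero h0')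
      have hdroplen : (cs.drop l.toNat).length < n := by
        simp only [List.length_drop]; omega
      rw [bChunks.eq_def cs l, dif_pos ⟨hl, hcs⟩]
      rw [PySem.List.slice_to cs (b := l) (by omega), PySem.List.slice_from cs (a := l) (by omega)]
      rw [List.flatMap_cons]
      rw [colA.eq_def cs l col]
      by_cases h : col < (cs.length : Int)
      · rw [dif_pos ⟨hl, h⟩]
        have htk : (cs.take l.toNat).length = min l.toNat cs.length := List.length_take
        have hcolsel : colSel col (cs.take l.toNat) = [PySem.List.pyGetD cs col ' '] := by
          unfold colSel
          rw [if_pos (by rw [htk]; push_cast; omega)]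
          congr 1
          rw [PySem.List.pyGetD_eq_getElem cs ' ' h0 h,
              PySem.List.pyGetD_eq_getElem (cs.take l.toNat) ' ' h0 (by rw [htk]; push_cast; omega)]
          exact List.getElem_take
        rw [hcolsel]
        rw [colA_shift cs l hl ((cs.length : Int) - col).toNat col h0 (le_refl _)]
        rw [ih _ hdroplen (cs.drop l.toNat) rfl col h0 hcol]
        simp
      · rw [dif_neg (by rintro ⟨-, hc⟩; omega)]
        have h1 : colSel col (cs.take l.toNat) = [] := by
          unfold colSel
          rw [if_neg]
          rw [List.length_take]
          push_cast
          omega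
        rw [h1, ← ih _ hdroplen (cs.drop l.toNat) rfl col h0 hcol]
        rw [colA.eq_def (cs.drop l.toNat) l col,
            dif_neg (by rintro ⟨-, hc⟩; simp only [List.length_drop] at hc; omega)]
        simp

theorem foldl_aInner (cs : List Char) (l : Int) (xs : List Int) (init : List Char) :
    xs.foldl (fun r i => aInner cs l i r) init = init ++ xs.flatMap (colA cs l) := by
  induction xs generalizing init with
  | nil => simp
  | cons x rest ih =>
    simp only [List.foldl_cons, List.flatMap_cons]
    rw [aInner_eq, ih, List.append_assoc]

theorem foldl_colSel (col : Int) (rows : List (List Char)) (out : List Char) :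
    rows.foldl (fun out row =>
      if col < (row.length : Int) then out ++ [PySem.List.pyGetD row col ' '] else out) out
      = out ++ rows.flatMap (colSel col) := by
  induction rows generalizing out with
  | nil => simp
  | cons row rest ih =>
    simp only [List.foldl_cons, List.flatMap_cons]
    rw [ih]
    unfold colSel
    split_ifs <;> simp

theorem foldl_outer (rows : List (List Char)) (xs : List Int) (init : List Char) :
    xs.foldl (fun out col =>
      rows.foldl (fun out row =>
        if col < (row.length : Int) then out ++ [PySem.List.pyGetD row col ' '] else out) out) init
      = init ++ xs.flatMap (fun col => rows.flatMap (colSel col)) := by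
  induction xs generalizing init with
  | nil => simp
  | cons x rest ih =>
    simp only [List.foldl_cons, List.flatMap_cons]
    rw [foldl_colSel, ih, List.append_assoc]

-- ===== VERDICT (by name: the statement is the Claim_ definition above) =====
theorem code_transp_spec : Claim_equal_code_transp := by
  intro message l _
  unfold Spec_code_transp code_transp code_transp_alt
  by_cases hl : l ≤ 0
  · rw [if_pos hl, PySem.List.pyRange_one_eq_nil (by omega)]
    rfl
  · rw [if_neg hl]
    congr 1
    rw [foldl_aInner, foldl_outer]
    simp only [List.nil_append]
    apply List.flatMap_congr
    intro col hcol
    rw [PySem.List.mem_pyRange_one] at hcol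
    exact colA_eq_flat l (by omega) message.toList.length message.toList rfl col hcol.1 hcol.2
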